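-- pv_equiv track=rewrite | github.com/henry-sga/workcover-dashboard | coc_parser.py | match_worker_from_text
-- ===== SOURCE A (Python) =====
-- def match_worker_from_text(text: str, worker_names: list[str]) -> str | None:
--     """
--     Try to match a worker name from the OCR text against the list of known
--     workers in the database. Uses fuzzy substring matching.
--     """
--     text_upper = text.upper()
--     best_match = None
--     best_score = 0
--
--     for name in worker_names:
--         parts = name.upper().split()
--         # Check if last name appears in text
--         if len(parts) >= 2:
--             last = parts[-1]
--             first = parts[0]
--             # Full name match (best)
--             if name.upper() in text_upper:
--                 return name
--             # Last name match
--             if last in text_upper and len(last) > 2: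
--                 score = 2
--                 # First name also matches
--                 if first in text_upper:
--                     score = 3
--                 if score > best_score:
--                     best_score = score
--                     best_match = name
--         elif name.upper() in text_upper:
--             return name
--
--     return best_match if best_score >= 2 else None
-- ===== SOURCE B (Python) =====
-- def match_worker_from_text(text: str, worker_names: list[str]) -> str | None:
--     """Accumulator-free re-implementation: first full substring match wins;
--     otherwise pick the first name scoring 3, else the first scoring 2."""
--     tu = text.upper()
--     full = next((n for n in worker_names if n.upper() in tu), None)
--     if full is not None:
--         return full
--
--     def score(name):
--         parts = name.upper().split()
--         if len(parts) < 2: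
--             return 0
--         last, first = parts[-1], parts[0]
--         if last not in tu or len(last) <= 2:
--             return 0
--         return 3 if first in tu else 2
--
--     for target in (3, 2):
--         hit = next((n for n in worker_names if score(n) == target), None)
--         if hit is not None:
--             return hit
--     return None
-- ===== Notes on version B (the rewrite author's own statement) =====
-- stated objective: simpler
-- what changed: Removed the running best-match/best-score accumulator: B is three independent first-match searches (first full substring match, else first name scoring 3, else first name scoring 2), exploiting that scores only take values 2 and 3 so the strict-maximum loop equals a priority-ordered first-hit search.
import Mathlib
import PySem

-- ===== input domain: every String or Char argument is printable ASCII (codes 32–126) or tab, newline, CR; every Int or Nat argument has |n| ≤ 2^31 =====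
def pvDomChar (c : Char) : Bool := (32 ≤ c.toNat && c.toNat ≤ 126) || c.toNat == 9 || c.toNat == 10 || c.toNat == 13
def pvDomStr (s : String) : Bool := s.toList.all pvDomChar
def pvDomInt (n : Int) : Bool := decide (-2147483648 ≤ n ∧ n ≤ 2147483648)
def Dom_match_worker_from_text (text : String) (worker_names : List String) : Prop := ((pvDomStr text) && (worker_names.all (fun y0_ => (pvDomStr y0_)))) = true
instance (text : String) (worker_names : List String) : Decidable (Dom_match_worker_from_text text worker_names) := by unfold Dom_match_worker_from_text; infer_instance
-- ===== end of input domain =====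

-- B removes A's running best-match/best-score state: three priority-ordered first-hit searches (objective: simpler).

-- ===== PORT A =====
-- A's single loop with the best/score accumulator; `parts[-1]`/`parts[0]` are read via getLastD/headD (exact: the branch requires parts.length ≥ 2).
def matchLoopA (tu : String) : List String → Option String → Int → Option String
  | [], best, score => if score ≥ 2 then best else none
  | name :: rest, best, score =>
    let parts := PySem.Str.split₀ (PySem.Str.upper name)
    if parts.length ≥ 2 then
      let last := parts.getLastD ""
      let first := parts.headD ""
      if PySem.Str.isIn (PySem.Str.upper name) tu then some name
      else if PySem.Str.isIn last tu ∧ PySem.Str.len last > 2 then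
        let s : Int := if PySem.Str.isIn first tu then 3 else 2
        if s > score then matchLoopA tu rest (some name) s
        else matchLoopA tu rest best score
      else matchLoopA tu rest best score
    else if PySem.Str.isIn (PySem.Str.upper name) tu then some name
    else matchLoopA tu rest best score

def match_worker_from_text (text : String) (worker_names : List String) : Option String :=
  matchLoopA (PySem.Str.upper text) worker_names none 0

-- ===== PORT B =====
-- score(name): 0, 2 or 3 exactly as Source B computes it.
def scoreB (tu : String) (name : String) : Int :=
  let parts := PySem.Str.split₀ (PySem.Str.upper name)
  if parts.length < 2 then 0
  else
    let last := parts.getLastD ""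
    if ¬ PySem.Str.isIn last tu ∨ ¬ (PySem.Str.len last > 2) then 0
    else if PySem.Str.isIn (parts.headD "") tu then 3 else 2

def match_worker_from_text_alt (text : String) (worker_names : List String) : Option String :=
  let tu := PySem.Str.upper text
  match worker_names.find? (fun n => PySem.Str.isIn (PySem.Str.upper n) tu) with
  | some full => some full
  | none =>
    match worker_names.find? (fun n => scoreB tu n == 3) with
    | some hit => some hit
    | none => worker_names.find? (fun n => scoreB tu n == 2)

-- ===== PRECONDITION & SPEC =====
def Spec_match_worker_from_text (text : String) (worker_names : List String) (out : Option String) : Prop := out = match_worker_from_text_alt text worker_names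
instance (text : String) (worker_names : List String) (out : Option String) : Decidable (Spec_match_worker_from_text text worker_names out) := by unfold Spec_match_worker_from_text; infer_instance

-- ===== CLAIM (what is proved, stated in full; the proofs are below) =====
def Claim_equal_match_worker_from_text : Prop := ∀ (text : String) (worker_names : List String), Dom_match_worker_from_text text worker_names → Spec_match_worker_from_text text worker_names (match_worker_from_text text worker_names)

-- ===== LEMMAS AND PROOFS =====
-- In state score = 3 the accumulator can never be beaten: only a full match changes the result.
theorem matchLoopA_state3 (tu : String) (names : List String) (b : String) :
    matchLoopA tu names (some b) 3 =
      match names.find? (fun n => PySem.Str.isIn (PySem.Str.upper n) tu) with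
      | some full => some full
      | none => some b := by
  induction names with
  | nil => simp [matchLoopA, List.find?]
  | cons name rest ih =>
    rcases Bool.eq_false_or_eq_true (PySem.Str.isIn (PySem.Str.upper name) tu) with hf | hf
    case inr =>
      rw [List.find?_cons_of_neg (p := fun n => PySem.Str.isIn (PySem.Str.upper n) tu) (by rw [Bool.not_eq_true]; exact hf), ← ih]
      simp only [matchLoopA]
      split_ifs <;> first | rfl | omega | (rw [‹PySem.Str.isIn (PySem.Str.upper name) tu = true›] at hf; cases hf)
    case inl =>
      have lhs : matchLoopA tu (name :: rest) (some b) 3 = some name := by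
        simp only [matchLoopA]
        by_cases h1 : (PySem.Str.split₀ (PySem.Str.upper name)).length ≥ 2
        · rw [if_pos h1, if_pos hf]
        · rw [if_neg h1, if_pos hf]
      rw [lhs, List.find?_cons_of_pos (p := fun n => PySem.Str.isIn (PySem.Str.upper n) tu) hf]

theorem matchLoopA_state2 (tu : String) (names : List String) (b : String) :
    matchLoopA tu names (some b) 2 =
      match names.find? (fun n => PySem.Str.isIn (PySem.Str.upper n) tu) with
      | some full => some full
      | none =>
        match names.find? (fun n => scoreB tu n == 3) with
        | some hit => some hit
        | none => some b := by
  induction names with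
  | nil => simp [matchLoopA, List.find?]
  | cons name rest ih =>
    rcases Bool.eq_false_or_eq_true (PySem.Str.isIn (PySem.Str.upper name) tu) with hf | hf
    case inl =>
      have lhs : matchLoopA tu (name :: rest) (some b) 2 = some name := by
        simp only [matchLoopA]
        by_cases h1 : (PySem.Str.split₀ (PySem.Str.upper name)).length ≥ 2
        · rw [if_pos h1, if_pos hf]
        · rw [if_neg h1, if_pos hf]
      rw [lhs, List.find?_cons_of_pos (p := fun n => PySem.Str.isIn (PySem.Str.upper n) tu) hf]
    case inr =>
      rw [List.find?_cons_of_neg (p := fun n => PySem.Str.isIn (PySem.Str.upper n) tu) (by rw [Bool.not_eq_true]; exact hf)]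
      simp only [matchLoopA]
      by_cases h1 : (PySem.Str.split₀ (PySem.Str.upper name)).length ≥ 2
      · by_cases h2 : PySem.Str.isIn ((PySem.Str.split₀ (PySem.Str.upper name)).getLastD "") tu = true ∧ PySem.Str.len ((PySem.Str.split₀ (PySem.Str.upper name)).getLastD "") > 2
        · by_cases h3 : PySem.Str.isIn ((PySem.Str.split₀ (PySem.Str.upper name)).headD "") tu = true
          · have hs : (fun n => scoreB tu n == 3) name = true := by
              show (scoreB tu name == 3) = true
              simp only [scoreB]
              rw [if_neg (by omega), if_neg (fun hc => hc.elim (fun hA => hA h2.1) (fun hB => hB h2.2)), if_pos h3]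
              decide
            rw [List.find?_cons_of_pos (p := fun n => scoreB tu n == 3) hs]
            rw [if_pos h1, if_neg (by rw [Bool.not_eq_true]; exact hf), if_pos h2, if_pos h3,
                if_pos (by norm_num : (3:Int) > 2), matchLoopA_state3]
          · have hs : ¬ ((fun n => scoreB tu n == 3) name = true) := by
              rw [Bool.not_eq_true]
              show (scoreB tu name == 3) = false
              simp only [scoreB]
              rw [if_neg (by omega), if_neg (fun hc => hc.elim (fun hA => hA h2.1) (fun hB => hB h2.2)), if_neg h3]
              decide
            rw [List.find?_cons_of_neg (p := fun n => scoreB tu n == 3) hs]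
            rw [if_pos h1, if_neg (by rw [Bool.not_eq_true]; exact hf), if_pos h2, if_neg h3,
                if_neg (by norm_num : ¬ ((2:Int) > 2))]
            exact ih
        · have hs : ¬ ((fun n => scoreB tu n == 3) name = true) := by
            rw [Bool.not_eq_true]
            show (scoreB tu name == 3) = false
            simp only [scoreB]
            rw [if_neg (by omega), if_pos (not_and_or.mp h2)]
            decide
          rw [List.find?_cons_of_neg (p := fun n => scoreB tu n == 3) hs]
          rw [if_pos h1, if_neg (by rw [Bool.not_eq_true]; exact hf), if_neg h2]
          exact ih
      · have hs : ¬ ((fun n => scoreB tu n == 3) name = true) := by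
          rw [Bool.not_eq_true]
          show (scoreB tu name == 3) = false
          simp only [scoreB]
          rw [if_pos (by omega)]
          decide
        rw [List.find?_cons_of_neg (p := fun n => scoreB tu n == 3) hs]
        rw [if_neg h1, if_neg (by rw [Bool.not_eq_true]; exact hf)]
        exact ih

theorem matchLoopA_state0 (tu : String) (names : List String) :
    matchLoopA tu names none 0 =
      match names.find? (fun n => PySem.Str.isIn (PySem.Str.upper n) tu) with
      | some full => some full
      | none =>
        match names.find? (fun n => scoreB tu n == 3) with
        | some hit => some hit
        | none => names.find? (fun n => scoreB tu n == 2) := by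
  induction names with
  | nil => simp [matchLoopA, List.find?]
  | cons name rest ih =>
    rcases Bool.eq_false_or_eq_true (PySem.Str.isIn (PySem.Str.upper name) tu) with hf | hf
    case inl =>
      have lhs : matchLoopA tu (name :: rest) none 0 = some name := by
        simp only [matchLoopA]
        by_cases h1 : (PySem.Str.split₀ (PySem.Str.upper name)).length ≥ 2
        · rw [if_pos h1, if_pos hf]
        · rw [if_neg h1, if_pos hf]
      rw [lhs, List.find?_cons_of_pos (p := fun n => PySem.Str.isIn (PySem.Str.upper n) tu) hf]
    case inr =>
      rw [List.find?_cons_of_neg (p := fun n => PySem.Str.isIn (PySem.Str.upper n) tu) (by rw [Bool.not_eq_true]; exact hf)]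
      simp only [matchLoopA]
      by_cases h1 : (PySem.Str.split₀ (PySem.Str.upper name)).length ≥ 2
      · by_cases h2 : PySem.Str.isIn ((PySem.Str.split₀ (PySem.Str.upper name)).getLastD "") tu = true ∧ PySem.Str.len ((PySem.Str.split₀ (PySem.Str.upper name)).getLastD "") > 2
        · by_cases h3 : PySem.Str.isIn ((PySem.Str.split₀ (PySem.Str.upper name)).headD "") tu = true
          · have hs : (fun n => scoreB tu n == 3) name = true := by
              show (scoreB tu name == 3) = true
              simp only [scoreB]
              rw [if_neg (by omega), if_neg (fun hc => hc.elim (fun hA => hA h2.1) (fun hB => hB h2.2)), if_pos h3]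
              decide
            rw [List.find?_cons_of_pos (p := fun n => scoreB tu n == 3) hs]
            rw [if_pos h1, if_neg (by rw [Bool.not_eq_true]; exact hf), if_pos h2, if_pos h3,
                if_pos (by norm_num : (3:Int) > 0), matchLoopA_state3]
          · have hs3 : ¬ ((fun n => scoreB tu n == 3) name = true) := by
              rw [Bool.not_eq_true]
              show (scoreB tu name == 3) = false
              simp only [scoreB]
              rw [if_neg (by omega), if_neg (fun hc => hc.elim (fun hA => hA h2.1) (fun hB => hB h2.2)), if_neg h3]
              decide
            have hs2 : (fun n => scoreB tu n == 2) name = true := by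
              show (scoreB tu name == 2) = true
              simp only [scoreB]
              rw [if_neg (by omega), if_neg (fun hc => hc.elim (fun hA => hA h2.1) (fun hB => hB h2.2)), if_neg h3]
              decide
            rw [List.find?_cons_of_neg (p := fun n => scoreB tu n == 3) hs3,
                List.find?_cons_of_pos (p := fun n => scoreB tu n == 2) hs2]
            rw [if_pos h1, if_neg (by rw [Bool.not_eq_true]; exact hf), if_pos h2, if_neg h3,
                if_pos (by norm_num : (2:Int) > 0), matchLoopA_state2]
        · have hs3 : ¬ ((fun n => scoreB tu n == 3) name = true) := by
            rw [Bool.not_eq_true]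
            show (scoreB tu name == 3) = false
            simp only [scoreB]
            rw [if_neg (by omega), if_pos (not_and_or.mp h2)]
            decide
          have hs2 : ¬ ((fun n => scoreB tu n == 2) name = true) := by
            rw [Bool.not_eq_true]
            show (scoreB tu name == 2) = false
            simp only [scoreB]
            rw [if_neg (by omega), if_pos (not_and_or.mp h2)]
            decide
          rw [List.find?_cons_of_neg (p := fun n => scoreB tu n == 3) hs3,
              List.find?_cons_of_neg (p := fun n => scoreB tu n == 2) hs2]
          rw [if_pos h1, if_neg (by rw [Bool.not_eq_true]; exact hf), if_neg h2]
          exact ih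
      · have hs3 : ¬ ((fun n => scoreB tu n == 3) name = true) := by
          rw [Bool.not_eq_true]
          show (scoreB tu name == 3) = false
          simp only [scoreB]
          rw [if_pos (by omega)]
          decide
        have hs2 : ¬ ((fun n => scoreB tu n == 2) name = true) := by
          rw [Bool.not_eq_true]
          show (scoreB tu name == 2) = false
          simp only [scoreB]
          rw [if_pos (by omega)]
          decide
        rw [List.find?_cons_of_neg (p := fun n => scoreB tu n == 3) hs3,
            List.find?_cons_of_neg (p := fun n => scoreB tu n == 2) hs2]
        rw [if_neg h1, if_neg (by rw [Bool.not_eq_true]; exact hf)]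
        exact ih

-- ===== VERDICT (by name: the statement is the Claim_ definition above) =====
theorem match_worker_from_text_spec : Claim_equal_match_worker_from_text := by
  intro text names _
  unfold Spec_match_worker_from_text match_worker_from_text match_worker_from_text_alt
  exact matchLoopA_state0 _ _
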